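-- pv_equiv track=rewrite | github.com/revike/geekbrains | less3/hw-3.py | int_func2
-- ===== SOURCE A (Python) =====
-- def int_func2(text):
--     """Меняет регистр всех символов латинских букв"""
--     result = []
--     for t in text:
--         if chr(65) <= t <= chr(122):
--             if t == t.lower():
--                 t = t.upper()
--                 result.append(t)
--             else:
--                 t = t.lower()
--                 result.append(t)
--         else:
--             result.append(t)
--     return ''.join(result)
-- ===== SOURCE B (Python) =====
-- import string
--
-- def int_func2(text):
--     """Меняет регистр всех символов латинских букв"""
--     table = str.maketrans(string.ascii_uppercase + string.ascii_lowercase,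
--                           string.ascii_lowercase + string.ascii_uppercase)
--     return text.translate(table)
-- ===== Notes on version B (the rewrite author's own statement) =====
-- stated objective: idiomatic
-- what changed: Replaces the per-character range test and case branching with a precomputed 52-entry swap-case translation table applied in one text.translate pass.
import Mathlib
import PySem

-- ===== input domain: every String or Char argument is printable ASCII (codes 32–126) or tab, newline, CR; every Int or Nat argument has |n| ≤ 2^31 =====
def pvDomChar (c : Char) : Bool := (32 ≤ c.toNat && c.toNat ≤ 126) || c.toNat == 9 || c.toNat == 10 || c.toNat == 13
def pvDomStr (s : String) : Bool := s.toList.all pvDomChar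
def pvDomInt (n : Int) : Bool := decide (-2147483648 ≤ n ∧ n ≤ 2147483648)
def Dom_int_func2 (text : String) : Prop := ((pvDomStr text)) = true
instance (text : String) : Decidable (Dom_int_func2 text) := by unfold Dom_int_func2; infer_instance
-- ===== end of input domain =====

-- Header: B replaces A's per-character range test and case branching with a
-- precomputed 52-entry swap-case translation table applied via lookup (idiomatic).


-- ===== PORT A =====
-- literal transliteration: loop over the characters, appending one character per step
def int_func2 (text : String) : String :=
  String.mk (text.toList.foldl (fun result t =>
    if 'A' ≤ t ∧ t ≤ 'z' then
      if PySem.Chars.lowerChar t = t then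
        result ++ [PySem.Chars.upperChar t]
      else
        result ++ [PySem.Chars.lowerChar t]
    else
      result ++ [t]) [])

-- ===== PORT B =====
-- str.maketrans(upper+lower, lower+upper): a translation table mapping each ASCII letter
-- to its case-swapped form; translate = table lookup per character, identity by default.
def pvSwapTable : List (Char × Char) :=
  ("ABCDEFGHIJKLMNOPQRSTUVWXYZabcdefghijklmnopqrstuvwxyz".toList).zip
    ("abcdefghijklmnopqrstuvwxyzABCDEFGHIJKLMNOPQRSTUVWXYZ".toList)

def int_func2_alt (text : String) : String :=
  String.mk (text.toList.map (fun c => (pvSwapTable.lookup c).getD c))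

-- ===== PRECONDITION & SPEC =====
def Spec_int_func2 (text : String) (out : String) : Prop := out = int_func2_alt text
instance (text : String) (out : String) : Decidable (Spec_int_func2 text out) := by unfold Spec_int_func2; infer_instance

-- ===== CLAIM (what is proved, stated in full; the proofs are below) =====
def Claim_equal_int_func2 : Prop := ∀ (text : String), Dom_int_func2 text → Spec_int_func2 text (int_func2 text)

-- ===== LEMMAS AND PROOFS =====

-- the per-character agreement, checked on all codepoints below 128 (Dom guarantees them)
set_option maxRecDepth 2048 in
theorem pvCharStep_eq : ∀ n : Nat, n < 128 →
    (let t := Char.ofNat n;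
     (if 'A' ≤ t ∧ t ≤ 'z' then
        if PySem.Chars.lowerChar t = t then PySem.Chars.upperChar t
        else PySem.Chars.lowerChar t
      else t) = (pvSwapTable.lookup t).getD t) := by decide

theorem pvCharStep_eq' (t : Char) (h : pvDomChar t = true) :
    (if 'A' ≤ t ∧ t ≤ 'z' then
       if PySem.Chars.lowerChar t = t then PySem.Chars.upperChar t
       else PySem.Chars.lowerChar t
     else t) = (pvSwapTable.lookup t).getD t := by
  have hv : t.toNat < 128 := by
    unfold pvDomChar at h
    simp only [Bool.or_eq_true, Bool.and_eq_true, decide_eq_true_eq, beq_iff_eq] at h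
    omega
  have := pvCharStep_eq t.toNat hv
  simpa [Char.ofNat_toNat t] using this

theorem int_func2_spec : Claim_equal_int_func2 := by
  intro text hdom
  unfold Spec_int_func2 int_func2 int_func2_alt
  have hstep : (fun (result : List Char) (t : Char) =>
      if 'A' ≤ t ∧ t ≤ 'z' then
        if PySem.Chars.lowerChar t = t then
          result ++ [PySem.Chars.upperChar t]
        else
          result ++ [PySem.Chars.lowerChar t]
      else
        result ++ [t]) = (fun result t => result ++
          [if 'A' ≤ t ∧ t ≤ 'z' then
             if PySem.Chars.lowerChar t = t then PySem.Chars.upperChar t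
             else PySem.Chars.lowerChar t
           else t]) := by
    funext result t; split_ifs <;> rfl
  rw [hstep, PySem.List.foldl_append_singleton_eq_map]
  congr 1
  apply List.map_congr_left
  intro t ht
  have hd : pvDomChar t = true := by
    unfold Dom_int_func2 pvDomStr at hdom
    exact List.all_eq_true.mp hdom t ht
  exact pvCharStep_eq' t hd
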